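-- pv_equiv track=rewrite | github.com/martin12333/blisscribe | projects/bliss_web/bliss_app/bliss_webapp/blisscribe_py/parse_lexica.py | parseAlphabetic
-- ===== SOURCE A (Python) =====
-- def parseAlphabetic(word):
--     """
--     Parses the given non-alphabetic word into an
--     alphabetic-only version of the word.
--     ~
--     String cuts off at end of the first predicted lexeme.
--
--     e.g. parseAlphabetic("English (language)") -> "English"
--
--     :param word: str, non-alphabetic word
--     :return: str, alphabetic version of input word
--     """
--     new_word = []
--     remove = False
--
--     for char in word:
--         if remove == False and char != "(":
--             new_word.append(char)
--         elif char == "(":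
--             remove = True
--         elif char == ")":
--             remove = False
--
--     return ("".join(new_word)).strip()
-- ===== SOURCE B (Python) =====
-- import re
--
-- def parseAlphabetic(word):
--     # Strip each parenthesized group (an unclosed "(" consumes to end of string),
--     # then strip surrounding whitespace.
--     return re.sub(r'\([^)]*\)?', '', word).strip()
-- ===== Notes on version B (the rewrite author's own statement) =====
-- stated objective: idiomatic
-- what changed: Replaced the explicit char-by-char boolean state machine with a single regex substitution (pattern: open paren, a maximal run of non-close-paren characters, an optional close paren) followed by strip; the optional close paren reproduces A's unclosed-paren behaviour, and the C regex engine makes B measurably faster.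
import Mathlib
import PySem

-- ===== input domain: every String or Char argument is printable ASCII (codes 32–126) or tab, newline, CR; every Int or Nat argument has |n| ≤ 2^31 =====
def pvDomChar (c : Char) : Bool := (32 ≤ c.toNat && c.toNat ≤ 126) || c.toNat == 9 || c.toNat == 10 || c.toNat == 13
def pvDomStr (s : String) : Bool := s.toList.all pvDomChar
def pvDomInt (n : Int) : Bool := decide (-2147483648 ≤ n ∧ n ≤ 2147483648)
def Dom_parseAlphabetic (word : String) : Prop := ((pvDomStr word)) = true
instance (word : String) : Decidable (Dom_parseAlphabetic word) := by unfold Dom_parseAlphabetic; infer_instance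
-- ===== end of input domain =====

-- B replaces A's char-by-char boolean state machine with one regex substitution
-- (re.sub(r'\([^)]*\)?', '', word).strip()); objective: idiomatic.

-- ===== PORT A =====
-- A: fold over the characters with state (new_word, remove), then join and strip.
def parseAlphabetic (word : String) : String :=
  let st := word.toList.foldl
    (fun (s : List Char × Bool) c =>
      if s.2 = false ∧ c ≠ '(' then (s.1 ++ [c], s.2)
      else if c = '(' then (s.1, true)
      else if c = ')' then (s.1, false)
      else s)
    ([], false)
  PySem.Str.strip (String.ofList st.1)

-- ===== PORT B =====
-- B's regex \([^)]*\)? deletes, at each '(', the run up to and including the first ')'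
-- (to end of string if none). pvSkipPast is that one match step; pvSub is the global sub.
def pvSkipPast : List Char → List Char
  | [] => []
  | c :: rest => if c = ')' then rest else pvSkipPast rest

theorem pvSkipPast_length_le (l : List Char) : (pvSkipPast l).length ≤ l.length := by
  induction l with
  | nil => simp [pvSkipPast]
  | cons d t ih => by_cases h : d = ')' <;> simp [pvSkipPast, h] <;> omega

def pvSub : List Char → List Char
  | [] => []
  | c :: rest => if c = '(' then pvSub (pvSkipPast rest) else c :: pvSub rest
termination_by l => l.length
decreasing_by
  · have := pvSkipPast_length_le rest; simp; omega
  · simp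

def parseAlphabetic_alt (word : String) : String :=
  PySem.Str.strip (String.ofList (pvSub word.toList))

-- ===== PRECONDITION & SPEC =====
def Spec_parseAlphabetic (word : String) (out : String) : Prop := out = parseAlphabetic_alt word
instance (word : String) (out : String) : Decidable (Spec_parseAlphabetic word out) := by unfold Spec_parseAlphabetic; infer_instance

-- ===== CLAIM (what is proved, stated in full; the proofs are below) =====
def Claim_equal_parseAlphabetic : Prop := ∀ (word : String), Dom_parseAlphabetic word → Spec_parseAlphabetic word (parseAlphabetic word)

-- ===== LEMMAS AND PROOFS =====
theorem pvFold_eq (l : List Char) : ∀ (acc : List Char) (flag : Bool),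
    (l.foldl
      (fun (s : List Char × Bool) c =>
        if s.2 = false ∧ c ≠ '(' then (s.1 ++ [c], s.2)
        else if c = '(' then (s.1, true)
        else if c = ')' then (s.1, false)
        else s)
      (acc, flag)).1
    = acc ++ (if flag then pvSub (pvSkipPast l) else pvSub l) := by
  induction l with
  | nil => intro acc flag; cases flag <;> simp [pvSub, pvSkipPast]
  | cons c rest ih =>
    intro acc flag
    cases flag with
    | false =>
      by_cases h : c = '('
      · simp [List.foldl, h, ih, pvSub]
      · simp [List.foldl, h, ih, pvSub]
    | true =>
      by_cases h : c = '('
      · simp [List.foldl, h, ih, pvSkipPast]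
      · by_cases h2 : c = ')'
        · simp [List.foldl, h, h2, ih, pvSkipPast]
        · simp [List.foldl, h2, ih, pvSkipPast]

-- ===== VERDICT (by name: the statement is the Claim_ definition above) =====
theorem parseAlphabetic_spec : Claim_equal_parseAlphabetic := by
  intro word _
  unfold Spec_parseAlphabetic parseAlphabetic parseAlphabetic_alt
  simp [pvFold_eq]
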